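-- pv_equiv track=rewrite | github.com/eddmpython/codaro | src/codaro/document/percentFormat.py | _stripMarkdownComments
-- ===== SOURCE A (Python) =====
-- def _stripMarkdownComments(lines: list[str]) -> str:
--     result: list[str] = []
--     for line in lines:
--         if line.startswith("# "):
--             result.append(line[2:])
--         elif line == "#":
--             result.append("")
--         else:
--             result.append(line)
--     return _stripTrailingBlanks("\n".join(result))
--
-- def _stripTrailingBlanks(text: str) -> str:
--     return text.strip("\n").rstrip()
-- ===== SOURCE B (Python) =====
-- def _transform(line):
--     if line.startswith("# "):
--         return line[2:]
--     if line == "#":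
--         return ""
--     return line
--
--
-- def _stripMarkdownComments(lines):
--     ts = [_transform(line) for line in lines]
--     while ts and ts[0].lstrip("\n") == "":
--         ts.pop(0)
--     if ts:
--         ts[0] = ts[0].lstrip("\n")
--     while ts and ts[-1].rstrip() == "":
--         ts.pop()
--     if ts:
--         ts[-1] = ts[-1].rstrip()
--     return "\n".join(ts)
-- ===== Notes on version B (the rewrite author's own statement) =====
-- stated objective: alternative
-- what changed: B trims the transformed line list from both ends (dropping leading newline-only pieces and trailing whitespace-only pieces, adjusting the boundary elements) and joins once, instead of A's join-the-whole-text-then-strip('\n')-then-rstrip.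
import Mathlib
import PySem

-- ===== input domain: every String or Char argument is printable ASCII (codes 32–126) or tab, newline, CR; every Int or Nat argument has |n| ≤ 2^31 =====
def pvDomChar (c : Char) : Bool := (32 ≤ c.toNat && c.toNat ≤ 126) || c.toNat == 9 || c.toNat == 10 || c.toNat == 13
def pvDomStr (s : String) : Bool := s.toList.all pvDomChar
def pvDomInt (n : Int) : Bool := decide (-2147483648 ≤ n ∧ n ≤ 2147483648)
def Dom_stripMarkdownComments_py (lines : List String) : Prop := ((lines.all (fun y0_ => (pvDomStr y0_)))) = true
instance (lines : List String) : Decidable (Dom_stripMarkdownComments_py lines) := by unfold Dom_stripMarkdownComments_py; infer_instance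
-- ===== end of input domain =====

-- B replaces A's join-then-strip of the whole text by trimming the transformed line list itself
-- from both ends (drop leading '\n'-only pieces, drop trailing whitespace-only pieces) before a
-- single join; objective: alternative decomposition, same cost.

-- ===== PORT A =====
def stripTrailingBlanks_py (text : String) : String :=
  PySem.Str.rstrip (PySem.Str.stripChars text "\n")

def stripMarkdownComments_py (lines : List String) : String :=
  let result : List String := lines.foldl (fun result line =>
    if PySem.Str.startswith line "# " then result ++ [PySem.Str.slice line (some 2) none]
    else if line == "#" then result ++ [""]
    else result ++ [line]) []
  stripTrailingBlanks_py (PySem.Str.join "\n" result)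

-- ===== PORT B =====
def bTransform (line : String) : String :=
  if PySem.Str.startswith line "# " then PySem.Str.slice line (some 2) none
  else if line == "#" then ""
  else line

-- hand port of s.lstrip("\n") (PySem has no lstrip-with-chars): drop leading '\n' characters; exact
def bLstripNl (s : String) : String := String.ofList (s.toList.dropWhile (fun c => c == '\n'))

def bTrimFront : List String → List String
  | [] => []
  | x :: rest => if bLstripNl x == "" then bTrimFront rest else bLstripNl x :: rest

def bTrimBackRev : List String → List String
  | [] => []
  | x :: rest => if PySem.Str.rstrip x == "" then bTrimBackRev rest else PySem.Str.rstrip x :: rest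

def stripMarkdownComments_py_alt (lines : List String) : String :=
  let ts := lines.map bTransform
  let ts := bTrimFront ts
  let ts := (bTrimBackRev ts.reverse).reverse
  PySem.Str.join "\n" ts

-- ===== PRECONDITION & SPEC =====
def Spec_stripMarkdownComments_py (lines : List String) (out : String) : Prop := out = stripMarkdownComments_py_alt lines
instance (lines : List String) (out : String) : Decidable (Spec_stripMarkdownComments_py lines out) := by unfold Spec_stripMarkdownComments_py; infer_instance

-- ===== CLAIM (what is proved, stated in full; the proofs are below) =====
def Claim_equal_stripMarkdownComments_py : Prop := ∀ (lines : List String), Dom_stripMarkdownComments_py lines → Spec_stripMarkdownComments_py lines (stripMarkdownComments_py lines)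

-- ===== LEMMAS AND PROOFS =====

def nlP : Char → Bool := fun c => c == '\n'

-- Chars-level mirrors of B's trimming helpers
def trimFrontC : List (List Char) → List (List Char)
  | [] => []
  | x :: rest => if x.dropWhile nlP = [] then trimFrontC rest else x.dropWhile nlP :: rest

def trimBackRevC : List (List Char) → List (List Char)
  | [] => []
  | x :: rest => if PySem.Chars.rstrip x = [] then trimBackRevC rest else PySem.Chars.rstrip x :: rest

theorem foldA (lines : List String) (acc : List String) :
    lines.foldl (fun result line =>
      if PySem.Str.startswith line "# " then result ++ [PySem.Str.slice line (some 2) none]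
      else if line == "#" then result ++ [""]
      else result ++ [line]) acc = acc ++ lines.map bTransform := by
  induction lines generalizing acc with
  | nil => simp
  | cons x xs ih =>
    simp only [List.foldl_cons, List.map_cons]
    have hx : (if PySem.Str.startswith x "# " then acc ++ [PySem.Str.slice x (some 2) none]
        else if x == "#" then acc ++ [""] else acc ++ [x]) = acc ++ [bTransform x] := by
      unfold bTransform; split_ifs <;> rfl
    rw [hx, ih]; simp

theorem dropWhile_dropWhile_subset {p q : Char → Bool} (h : ∀ c, p c = true → q c = true)
    (l : List Char) : (l.dropWhile p).dropWhile q = l.dropWhile q := by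
  induction l with
  | nil => rfl
  | cons a t ih =>
    by_cases hp : p a = true
    · simp [hp, h a hp, ih]
    · simp [List.dropWhile_cons, hp]

theorem rstrip_stripChars_nl (cs : List Char) :
    PySem.Chars.rstrip (PySem.Chars.stripChars cs ['\n']) = PySem.Chars.rstrip (cs.dropWhile nlP) := by
  have hfun : (fun c => (['\n'] : List Char).contains c) = nlP := by
    funext c; unfold nlP; cases h : c == '\n' <;> simp_all
  have hsub : ∀ c, nlP c = true → PySem.Chars.isspace c = true := by
    intro c hc
    have : c = '\n' := by simpa [nlP] using hc
    subst this; decide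
  simp only [PySem.Chars.stripChars, PySem.Chars.rstrip, hfun, List.reverse_reverse]
  rw [dropWhile_dropWhile_subset hsub]

theorem join_dropWhile_front (css : List (List Char)) :
    (PySem.Chars.join ['\n'] css).dropWhile nlP = PySem.Chars.join ['\n'] (trimFrontC css) := by
  induction css with
  | nil => simp [PySem.Chars.join_nil, trimFrontC]
  | cons x rest ih =>
    cases rest with
    | nil =>
      simp only [PySem.Chars.join_singleton, trimFrontC]
      split_ifs with h
      · simp [h, PySem.Chars.join_nil]
      · simp [PySem.Chars.join_singleton]
    | cons y r =>
      rw [PySem.Chars.join_cons_cons]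
      have hsplit : x ++ ['\n'] ++ PySem.Chars.join ['\n'] (y :: r)
          = x ++ ('\n' :: PySem.Chars.join ['\n'] (y :: r)) := by simp
      rw [hsplit, List.dropWhile_append]
      by_cases h : x.dropWhile nlP = []
      · rw [if_pos (by simp [h])]
        have : ('\n' :: PySem.Chars.join ['\n'] (y :: r)).dropWhile nlP
            = (PySem.Chars.join ['\n'] (y :: r)).dropWhile nlP := by
          simp [nlP]
        rw [this, ih]
        simp [trimFrontC, h]
      · rw [if_neg (by simp [h])]
        simp only [trimFrontC, if_neg h]
        rw [PySem.Chars.join_cons_cons]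
        simp

theorem rstrip_append (a b : List Char) :
    PySem.Chars.rstrip (a ++ b)
      = if PySem.Chars.rstrip b = [] then PySem.Chars.rstrip a else a ++ PySem.Chars.rstrip b := by
  simp only [PySem.Chars.rstrip, List.reverse_append, List.dropWhile_append]
  by_cases h : (b.reverse.dropWhile PySem.Chars.isspace) = []
  · rw [if_pos (by simp [h]), if_pos (by simp [h])]
  · rw [if_neg (by simp [h]), if_neg (by simp [h])]
    simp

theorem join_append_singleton (l : List (List Char)) (x : List Char) (hl : l ≠ []) :
    PySem.Chars.join ['\n'] (l ++ [x]) = PySem.Chars.join ['\n'] l ++ '\n' :: x := by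
  induction l with
  | nil => exact absurd rfl hl
  | cons a t ih =>
    cases t with
    | nil => simp [PySem.Chars.join_cons_cons, PySem.Chars.join_singleton]
    | cons b u =>
      have h1 : (a :: b :: u) ++ [x] = a :: ((b :: u) ++ [x]) := by simp
      rw [h1]
      have h2 : (b :: u) ++ [x] = b :: (u ++ [x]) := by simp
      rw [h2, PySem.Chars.join_cons_cons, ← h2, ih (by simp), PySem.Chars.join_cons_cons]
      simp

theorem join_rstrip_back (css : List (List Char)) :
    PySem.Chars.rstrip (PySem.Chars.join ['\n'] css)
      = PySem.Chars.join ['\n'] ((trimBackRevC css.reverse).reverse) := by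
  induction css using List.reverseRecOn with
  | nil => simp [PySem.Chars.join_nil, trimBackRevC, PySem.Chars.rstrip]
  | append_singleton l x ih =>
    rw [List.reverse_append]
    simp only [List.reverse_cons, List.reverse_nil, List.nil_append, List.singleton_append]
    by_cases hl : l = []
    · subst hl
      simp only [List.reverse_nil, trimBackRevC]
      split_ifs with h
      · simp [h, PySem.Chars.join_nil]
      · simp [PySem.Chars.join_singleton]
    · rw [join_append_singleton l x hl]
      have hx : PySem.Chars.join ['\n'] l ++ '\n' :: x
          = PySem.Chars.join ['\n'] l ++ (['\n'] ++ x) := by simp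
      rw [hx, rstrip_append]
      have hnlx : PySem.Chars.rstrip (['\n'] ++ x)
          = if PySem.Chars.rstrip x = [] then [] else '\n' :: PySem.Chars.rstrip x := by
        rw [rstrip_append]
        split_ifs with h
        · decide
        · rfl
      by_cases h : PySem.Chars.rstrip x = []
      · rw [hnlx, if_pos h, if_pos rfl, ih]
        simp [trimBackRevC, h]
      · rw [hnlx, if_neg h, if_neg (by simp)]
        simp only [trimBackRevC, if_neg h, List.reverse_cons]
        rw [join_append_singleton _ _ (by simp [hl])]
        simp

theorem bLstripNl_toList (x : String) : (bLstripNl x).toList = x.toList.dropWhile nlP := by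
  simp only [bLstripNl, String.toList_ofList]; rfl

theorem bLstripNl_eq_empty (x : String) :
    (bLstripNl x == "") = (x.toList.dropWhile nlP).isEmpty := by
  have hiff : (bLstripNl x = "") ↔ (x.toList.dropWhile nlP = []) := by
    rw [← String.toList_inj]; simp [bLstripNl_toList]
  rw [Bool.eq_iff_iff]; simp [List.isEmpty_iff, hiff]

theorem trimFront_map (ss : List String) :
    (bTrimFront ss).map String.toList = trimFrontC (ss.map String.toList) := by
  induction ss with
  | nil => rfl
  | cons x t ih =>
    simp only [bTrimFront, List.map_cons, trimFrontC]
    by_cases h : x.toList.dropWhile nlP = []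
    · rw [if_pos (by simp [bLstripNl_eq_empty, h]), if_pos h, ih]
    · rw [if_neg (by simp [bLstripNl_eq_empty, List.isEmpty_iff, h]), if_neg h]
      simp [bLstripNl_toList]

theorem rstrip_eq_empty (x : String) :
    (PySem.Str.rstrip x == "") = (PySem.Chars.rstrip x.toList).isEmpty := by
  have hiff : (PySem.Str.rstrip x = "") ↔ (PySem.Chars.rstrip x.toList = []) := by
    rw [← String.toList_inj]; simp
  rw [Bool.eq_iff_iff]; simp [List.isEmpty_iff, hiff]

theorem trimBackRev_map (ss : List String) :
    (bTrimBackRev ss).map String.toList = trimBackRevC (ss.map String.toList) := by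
  induction ss with
  | nil => rfl
  | cons x t ih =>
    simp only [bTrimBackRev, List.map_cons, trimBackRevC]
    by_cases h : PySem.Chars.rstrip x.toList = []
    · rw [if_pos (by simp [rstrip_eq_empty, h]), if_pos h, ih]
    · rw [if_neg (by simp [rstrip_eq_empty, List.isEmpty_iff, h]), if_neg h]
      simp [PySem.Str.toList_rstrip]

-- ===== VERDICT (by name: the statement is the Claim_ definition above) =====
theorem stripMarkdownComments_py_spec : Claim_equal_stripMarkdownComments_py := by
  intro lines _
  unfold Spec_stripMarkdownComments_py
  apply String.toList_inj.mp
  unfold stripMarkdownComments_py stripMarkdownComments_py_alt stripTrailingBlanks_py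
  rw [foldA lines []]
  simp only [List.nil_append, PySem.Str.toList_rstrip, PySem.Str.toList_stripChars,
    PySem.Str.toList_join]
  have hnl : ("\n" : String).toList = ['\n'] := rfl
  rw [hnl, rstrip_stripChars_nl, join_dropWhile_front, join_rstrip_back]
  rw [List.map_reverse, trimBackRev_map, List.map_reverse, trimFront_map]
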